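-- pv_equiv track=rewrite | github.com/ZebraForce9/Ex8 | nonogram.py | intersection_row
-- ===== SOURCE A (Python) =====
-- from typing import List, Tuple, Optional
--
-- def intersection_row(rows: List[List[int]]) -> List[int]:
--     """
--     Get the intersection of all valid variations of a row.
--     """
--     square_intersection = zip(*rows)
--     row_intersection = []
--
--     for square in square_intersection:
--         first = square[0]
--         for i in range(1, len(square)):
--             if square[i] != first:
--                 row_intersection.append(-1)
--                 break
--         else:
--             row_intersection.append(first)
--
--     return row_intersection
-- ===== SOURCE B (Python) =====
-- def intersection_row(rows):
--     """Row-major fold: merge rows pairwise, keeping agreeing values, else -1."""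
--     if not rows:
--         return []
--     acc = list(rows[0])
--     for row in rows[1:]:
--         acc = [x if x == y else -1 for x, y in zip(acc, row)]
--     return acc
-- ===== Notes on version B (the rewrite author's own statement) =====
-- stated objective: alternative
-- what changed: Replaced the column-wise zip(*rows) transpose with inner equality scan by a row-major left fold that pairwise merges each row into an accumulator (keep value where equal, else -1), truncating to the shorter length at each step.
import Mathlib
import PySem

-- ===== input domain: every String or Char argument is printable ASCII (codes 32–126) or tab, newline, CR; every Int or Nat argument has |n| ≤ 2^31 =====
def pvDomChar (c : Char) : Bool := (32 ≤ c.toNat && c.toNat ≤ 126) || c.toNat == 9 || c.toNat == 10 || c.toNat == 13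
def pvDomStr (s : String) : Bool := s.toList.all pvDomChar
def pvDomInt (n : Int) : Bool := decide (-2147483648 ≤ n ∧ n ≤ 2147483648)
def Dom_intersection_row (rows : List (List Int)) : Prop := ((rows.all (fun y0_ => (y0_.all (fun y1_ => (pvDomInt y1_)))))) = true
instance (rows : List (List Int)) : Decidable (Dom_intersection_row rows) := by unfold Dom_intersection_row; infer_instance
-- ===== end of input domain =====

-- B replaces A's column-wise zip(*rows) scan by a row-major left fold that pairwise merges rows (alternative decomposition, same cost).


-- ===== PORT A =====
-- inner loop of A: scan the rest of a column for an element differing from the first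
def aCheck (first : Int) : List Int → Int
  | [] => first
  | z :: zs => if z ≠ first then -1 else aCheck first zs

-- zip(*rows) with rows = r :: rs: truncate to the shortest row, column by column
def zipStarAux : List Int → List (List Int) → List (List Int)
  | [], _ => []
  | x :: xs, rs =>
      if rs.any (·.isEmpty) then []
      else (x :: rs.map (·.headI)) :: zipStarAux xs (rs.map (·.tail))

def intersection_row (rows : List (List Int)) : List Int :=
  match rows with
  | [] => []
  | r :: rs => (zipStarAux r rs).map (fun sq => aCheck sq.headI sq.tail)

-- ===== PORT B =====
def bMerge (acc row : List Int) : List Int :=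
  List.zipWith (fun x y => if x = y then x else -1) acc row

def intersection_row_alt (rows : List (List Int)) : List Int :=
  match rows with
  | [] => []
  | r :: rs => rs.foldl bMerge r

-- ===== PRECONDITION & SPEC =====
def Spec_intersection_row (rows : List (List Int)) (out : List Int) : Prop := out = intersection_row_alt rows
instance (rows : List (List Int)) (out : List Int) : Decidable (Spec_intersection_row rows out) := by unfold Spec_intersection_row; infer_instance

-- ===== CLAIM (what is proved, stated in full; the proofs are below) =====
def Claim_equal_intersection_row : Prop := ∀ (rows : List (List Int)), Dom_intersection_row rows → Spec_intersection_row rows (intersection_row rows)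

-- ===== LEMMAS AND PROOFS =====
lemma aCheck_append (x y : Int) (l : List Int) :
    aCheck x (l ++ [y]) = if aCheck x l = y then aCheck x l else -1 := by
  induction l with
  | nil => simp only [List.nil_append, aCheck]; split_ifs <;> simp_all
  | cons z zs ih =>
      simp only [List.cons_append, aCheck]
      split_ifs with h <;> simp_all

lemma zipStar_map_nil (r : List Int) :
    (zipStarAux r []).map (fun sq => aCheck sq.headI sq.tail) = r := by
  induction r with
  | nil => simp [zipStarAux]
  | cons x xs ih => simp [zipStarAux, aCheck, ih]

lemma zipStar_map_append (r : List Int) (rs : List (List Int)) (row : List Int) :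
    (zipStarAux r (rs ++ [row])).map (fun sq => aCheck sq.headI sq.tail)
      = bMerge ((zipStarAux r rs).map (fun sq => aCheck sq.headI sq.tail)) row := by
  induction r generalizing rs row with
  | nil => simp [zipStarAux, bMerge]
  | cons x xs ih =>
      cases row with
      | nil => simp [zipStarAux, bMerge]
      | cons y ys =>
          by_cases h : rs.any (·.isEmpty)
          · simp [zipStarAux, h, bMerge]
          · have h2 : ((rs ++ [y :: ys]).any (·.isEmpty)) = false := by simp [h]
            simp only [zipStarAux, h, h2, Bool.false_eq_true, if_false, List.map_append,
              List.map_cons, List.headI_cons, List.tail_cons, bMerge, List.zipWith_cons_cons,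
              List.cons.injEq]
            exact ⟨aCheck_append x y (rs.map (·.headI)), ih (rs.map (·.tail)) ys⟩

lemma fold_eq (r : List Int) (rs : List (List Int)) :
    (zipStarAux r rs).map (fun sq => aCheck sq.headI sq.tail) = rs.foldl bMerge r := by
  induction rs using List.reverseRecOn with
  | nil => simpa using zipStar_map_nil r
  | append_singleton rs row ih =>
      rw [zipStar_map_append, ih, List.foldl_append]
      simp [List.foldl]


-- ===== VERDICT (by name: the statement is the Claim_ definition above) =====
theorem intersection_row_spec : Claim_equal_intersection_row := by
  intro rows _
  unfold Spec_intersection_row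
  cases rows with
  | nil => rfl
  | cons r rs =>
      simp only [intersection_row, intersection_row_alt]
      exact fold_eq r rs
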